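-- pv_equiv track=rewrite | github.com/andreea-son/CAVA-TEMA1 | tema1.py | compute_combinations
-- ===== SOURCE A (Python) =====
-- import itertools
--
-- def compute_combinations(N):
--     values = [i for i in range(N)]
--     combinations = itertools.combinations(values, 2)
--     combinations = list(combinations)
--     for i in range(N):
--         combinations.append((i, i))
--     combinations.sort(key=lambda tuple: (tuple[0], tuple[1]))
--     return combinations
-- ===== SOURCE B (Python) =====
-- def compute_combinations(N):
--     result = []
--     for i in range(N):
--         for j in range(i, N):
--             result.append((i, j))
--     return result
-- ===== Notes on version B (the rewrite author's own statement) =====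
-- stated objective: simpler
-- what changed: Replaces itertools.combinations + separate diagonal-append loop + O(n^2 log n) sort with a single nested loop that emits the pairs directly in lexicographic order, so no sort is needed.
import Mathlib
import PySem

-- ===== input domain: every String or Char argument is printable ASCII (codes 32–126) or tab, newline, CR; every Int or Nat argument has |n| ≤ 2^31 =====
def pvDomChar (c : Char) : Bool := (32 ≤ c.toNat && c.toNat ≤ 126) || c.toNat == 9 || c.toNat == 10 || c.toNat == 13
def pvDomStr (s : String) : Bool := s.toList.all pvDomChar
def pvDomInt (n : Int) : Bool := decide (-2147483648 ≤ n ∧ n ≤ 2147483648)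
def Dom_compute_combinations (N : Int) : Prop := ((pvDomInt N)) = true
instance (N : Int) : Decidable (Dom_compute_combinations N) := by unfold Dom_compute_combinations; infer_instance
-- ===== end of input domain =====

-- B replaces A's combinations+diagonal-append+sort with one nested loop that
-- emits the same pairs directly in sorted order (objective: simpler).


-- ===== PORT A =====
def compute_combinations (N : Int) : List (List Int) :=
  let values : List Int := PySem.List.pyRange 0 N 1
  let combinations : List (List Int) := PySem.List.combinations values 2
  let combinations : List (List Int) :=
    (PySem.List.pyRange 0 N 1).foldl (fun combinations i => combinations ++ [[i, i]]) combinations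
  PySem.List.sorted2 combinations (fun t => PySem.List.pyGetD t 0 0) (fun t => PySem.List.pyGetD t 1 0)

-- ===== PORT B =====
def compute_combinations_alt (N : Int) : List (List Int) :=
  (PySem.List.pyRange 0 N 1).foldl
    (fun result i =>
      (PySem.List.pyRange i N 1).foldl (fun result j => result ++ [[i, j]]) result) []

-- ===== PRECONDITION & SPEC =====
def Spec_compute_combinations (N : Int) (out : List (List Int)) : Prop := out = compute_combinations_alt N
instance (N : Int) (out : List (List Int)) : Decidable (Spec_compute_combinations N out) := by unfold Spec_compute_combinations; infer_instance

-- ===== CLAIM (what is proved, stated in full; the proofs are below) =====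
def Claim_equal_compute_combinations : Prop := ∀ (N : Int), Dom_compute_combinations N → Spec_compute_combinations N (compute_combinations N)

-- ===== LEMMAS AND PROOFS =====

-- the common normal form: all pairs [i, j] with a ≤ i ≤ j < N, in lexicographic order
def pvG (a N : Int) : List (List Int) :=
  (PySem.List.pyRange a N 1).flatMap (fun i => (PySem.List.pyRange i N 1).map (fun j => [i, j]))

-- the lexicographic sort key A uses
def pvKey (t : List Int) : Int ×ₗ Int := toLex (PySem.List.pyGetD t 0 0, PySem.List.pyGetD t 1 0)

theorem pvKey_pair (i j : Int) : pvKey [i, j] = toLex (i, j) := by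
  simp [pvKey, PySem.List.pyGetD, PySem.List.pyGet?, PySem.List.pyIdx?]

theorem pvG_nil {a N : Int} (h : N ≤ a) : pvG a N = [] := by
  simp [pvG, PySem.List.pyRange_one_eq_nil h]

theorem pvG_cons {a N : Int} (h : a < N) :
    pvG a N = ((PySem.List.pyRange a N 1).map (fun j => [a, j])) ++ pvG (a + 1) N := by
  conv_lhs => rw [pvG, PySem.List.pyRange_one_cons h, List.flatMap_cons]
  rfl

theorem pv_flatMap_single {α β : Type} (f : α → β) (L : List α) :
    L.flatMap (fun x => [f x]) = L.map f := by
  induction L with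
  | nil => rfl
  | cons a t ih => simp [List.flatMap_cons, ih]

theorem pv_mem_G {u : List Int} {a N : Int} (h : u ∈ pvG a N) :
    ∃ i j, u = [i, j] ∧ a ≤ i ∧ i ≤ j ∧ j < N := by
  simp only [pvG, List.mem_flatMap, List.mem_map, PySem.List.mem_pyRange_one] at h
  obtain ⟨i, ⟨hai, hiN⟩, j, ⟨hij, hjN⟩, rfl⟩ := h
  exact ⟨i, j, rfl, hai, hij, hjN⟩

-- B's nested foldl computes pvG
theorem pvB_foldl : ∀ (k : Nat) (a N : Int), k = (N - a).toNat → ∀ (acc : List (List Int)),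
    (PySem.List.pyRange a N 1).foldl
      (fun result i => (PySem.List.pyRange i N 1).foldl (fun result j => result ++ [[i, j]]) result) acc
    = acc ++ pvG a N := by
  intro k
  induction k with
  | zero =>
    intro a N hk acc
    have h : N ≤ a := by omega
    simp [PySem.List.pyRange_one_eq_nil h, pvG_nil h]
  | succ m ih =>
    intro a N hk acc
    have h : a < N := by omega
    rw [PySem.List.pyRange_one_cons h, List.foldl_cons,
      ih (a + 1) N (by omega), pvG_cons h]
    rw [PySem.List.foldl_append_eq_flatMap (fun j => [[a, j]]) (PySem.List.pyRange a N 1) acc]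
    rw [pv_flatMap_single (fun j => ([a, j] : List Int))]
    simp [List.append_assoc]

theorem pvB_eq (N : Int) : compute_combinations_alt N = pvG 0 N := by
  have := pvB_foldl (N - 0).toNat 0 N rfl []
  simpa [compute_combinations_alt] using this

-- A's pre-sort list is a permutation of pvG
theorem pvA_perm : ∀ (k : Nat) (a N : Int), k = (N - a).toNat →
    (PySem.List.combinations (PySem.List.pyRange a N 1) 2
      ++ (PySem.List.pyRange a N 1).map (fun i => [i, i])).Perm (pvG a N) := by
  intro k
  induction k with
  | zero =>
    intro a N hk
    have h : N ≤ a := by omega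
    simp [PySem.List.pyRange_one_eq_nil h, pvG_nil h]
  | succ m ih =>
    intro a N hk
    have h : a < N := by omega
    have ihs := ih (a + 1) N (by omega)
    rw [PySem.List.pyRange_one_cons h]
    rw [show (2 : Nat) = 1 + 1 from rfl, PySem.List.combinations_cons_succ,
      PySem.List.combinations_one, List.map_map, List.map_cons, pvG_cons h,
      PySem.List.pyRange_one_cons h, List.map_cons]
    refine List.Perm.trans List.perm_middle ?_
    rw [List.cons_append, List.append_assoc]
    exact (List.Perm.cons _ (List.Perm.append_left _ ihs))

-- pvG is strictly increasing under pvKey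
theorem pvG_pairwise : ∀ (k : Nat) (a N : Int), k = (N - a).toNat →
    (pvG a N).Pairwise (fun u v => pvKey u < pvKey v) := by
  intro k
  induction k with
  | zero =>
    intro a N hk
    have h : N ≤ a := by omega
    simp [pvG_nil h]
  | succ m ih =>
    intro a N hk
    have h : a < N := by omega
    rw [pvG_cons h]
    refine List.pairwise_append.mpr ⟨?_, ih (a + 1) N (by omega), ?_⟩
    · refine List.pairwise_map.mpr ?_
      refine (PySem.List.pairwise_lt_pyRange_one a N).imp ?_
      intro j1 j2 hj
      rw [pvKey_pair, pvKey_pair, Prod.Lex.lt_iff]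
      simp only [ofLex_toLex]
      exact Or.inr ⟨trivial, hj⟩
    · intro u hu v hv
      obtain ⟨j, hj, rfl⟩ := List.mem_map.mp hu
      obtain ⟨i2, j2, rfl, hi2, _, _⟩ := pv_mem_G hv
      rw [pvKey_pair, pvKey_pair, Prod.Lex.lt_iff]
      simp only [ofLex_toLex]
      have haj : a ≤ j ∧ j < N := PySem.List.mem_pyRange_one.mp hj
      exact Or.inl (by omega)

theorem pv_before_eq (a b : List Int) :
    (decide (PySem.List.pyGetD a 0 0 < PySem.List.pyGetD b 0 0) ||
      (!decide (PySem.List.pyGetD b 0 0 < PySem.List.pyGetD a 0 0) &&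
        decide (PySem.List.pyGetD a 1 0 < PySem.List.pyGetD b 1 0)))
      = decide (pvKey a < pvKey b) := by
  rw [Bool.eq_iff_iff]
  simp only [Bool.or_eq_true, Bool.and_eq_true, Bool.not_eq_eq_eq_not, Bool.not_true,
    decide_eq_false_iff_not, decide_eq_true_eq, pvKey, Prod.Lex.lt_iff, ofLex_toLex]
  constructor
  · rintro (h | ⟨h1, h2⟩)
    · exact Or.inl h
    · rcases lt_trichotomy (PySem.List.pyGetD a 0 0) (PySem.List.pyGetD b 0 0) with hl | he | hg
      · exact Or.inl hl
      · exact Or.inr ⟨he, h2⟩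
      · exact (h1 hg).elim
  · rintro (h | ⟨h1, h2⟩)
    · exact Or.inl h
    · exact Or.inr ⟨by omega, h2⟩

theorem pv_sorted2_eq_sorted (xs : List (List Int)) :
    PySem.List.sorted2 xs (fun t => PySem.List.pyGetD t 0 0) (fun t => PySem.List.pyGetD t 1 0)
      = PySem.List.sorted xs pvKey := by
  show List.foldl _ [] xs = List.foldl _ [] xs
  have hfun : (fun (a b : List Int) =>
      (decide (PySem.List.pyGetD a 0 0 < PySem.List.pyGetD b 0 0) ||
        (!decide (PySem.List.pyGetD b 0 0 < PySem.List.pyGetD a 0 0) &&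
          decide (PySem.List.pyGetD a 1 0 < PySem.List.pyGetD b 1 0))))
      = (fun (a b : List Int) => decide (pvKey a < pvKey b)) := by
    funext a b; exact pv_before_eq a b
  simp only [if_neg (by decide : ¬ (false = true))]
  rw [hfun]

-- ===== VERDICT (by name: the statement is the Claim_ definition above) =====
theorem compute_combinations_spec : Claim_equal_compute_combinations := by
  unfold Claim_equal_compute_combinations
  intro N _
  unfold Spec_compute_combinations compute_combinations
  simp only []  -- zeta-reduce the ported 'let' bindings
  rw [PySem.List.foldl_append_eq_flatMap (fun i => [[i, i]]) (PySem.List.pyRange 0 N 1),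
    pv_flatMap_single (fun i => ([i, i] : List Int)), pv_sorted2_eq_sorted, pvB_eq]
  exact PySem.List.sorted_eq_of_perm_of_pairwise_lt _ _ pvKey
    (pvA_perm (N - 0).toNat 0 N rfl).symm (pvG_pairwise (N - 0).toNat 0 N rfl)
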